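-- pv_equiv track=rewrite | github.com/irahorecka/barcode-levenshtein-search | pytrie/trie/trie.py | get_levenshtein_row
-- ===== SOURCE A (Python) =====
-- def get_levenshtein_row(letter, word, previous_row):
--     """Gets subsequent Levenshtein's row given query letter, template word,
--     and previous Levenshtein's row value."""
--     columns = len(word) + 1
--     current_row = [previous_row[0] + 1]
--
--     # Build one row for the letter, with a column for each letter in the target
--     # word, plus one for the empty string at column 0.
--     for column in range(1, columns):
--         insertion_cost = current_row[column - 1] + 1
--         deletion_cost = previous_row[column] + 1
--         if letter in (word[column - 1], "N"):
--             replacement_cost = previous_row[column - 1]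
--         else:
--             replacement_cost = previous_row[column - 1] + 1
--         current_row.append(min(insertion_cost, deletion_cost, replacement_cost))
--
--     return current_row
-- ===== SOURCE B (Python) =====
-- def get_levenshtein_row(letter, word, previous_row):
--     """Closed-form staged computation: the recurrence r[j] = min(r[j-1]+1, t_j)
--     unrolls to r[j] = min(base, min_{k<=j}(t_k - k)) + j, so the row is built in
--     three independent passes: per-column candidate costs (deletion/substitution,
--     index-shifted), their running prefix minima, and a final re-indexing map."""
--     base = previous_row[0] + 1
--     # per-column best of deletion/substitution, shifted by -k so a later +j
--     # recovers the cell value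
--     shifted = [min(previous_row[k] + 1,
--                    previous_row[k - 1] + (letter not in (word[k - 1], "N"))) - k
--                for k in range(1, len(word) + 1)]
--     # running prefix minima, seeded with the column-0 base value
--     pmins = []
--     m = base
--     for s in shifted:
--         m = min(m, s)
--         pmins.append(m)
--     return [base] + [m + j for j, m in enumerate(pmins, 1)]
-- ===== Notes on version B (the rewrite author's own statement) =====
-- stated objective: alternative
-- what changed: Replaces A's sequential min-of-three DP loop by the unrolled closed form r[j] = min(base, min_{k<=j}(t_k - k)) + j: three staged passes (index-shifted deletion/substitution candidates, running prefix minima, re-indexing map) instead of one recurrence coupling each cell to the previous one.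
import Mathlib
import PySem

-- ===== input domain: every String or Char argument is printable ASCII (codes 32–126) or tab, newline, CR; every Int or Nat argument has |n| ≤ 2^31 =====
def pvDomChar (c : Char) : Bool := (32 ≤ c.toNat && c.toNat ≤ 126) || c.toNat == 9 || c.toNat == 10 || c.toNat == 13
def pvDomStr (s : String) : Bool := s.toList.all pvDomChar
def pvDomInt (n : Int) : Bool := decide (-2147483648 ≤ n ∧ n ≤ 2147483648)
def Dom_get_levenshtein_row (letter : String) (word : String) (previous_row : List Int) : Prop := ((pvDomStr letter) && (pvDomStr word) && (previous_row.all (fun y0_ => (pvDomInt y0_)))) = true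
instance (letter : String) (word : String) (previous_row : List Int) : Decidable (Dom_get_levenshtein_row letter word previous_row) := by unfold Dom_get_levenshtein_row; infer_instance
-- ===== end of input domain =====

-- B replaces A's sequential min-of-three recurrence by the unrolled closed form
-- r[j] = min(base, min_{k≤j}(t_k - k)) + j, computed in three staged passes
-- (objective: alternative; same O(n) cost). Return-value equivalence only is proved.

-- ===== PORT A =====
-- loop body of A (current_row, column ↦ updated current_row); the `none` branch of the word
-- index is unreachable under Pre_ (Python raises IndexError there)
def levStepA (letter : String) (word : String) (previous_row : List Int)
    (current_row : List Int) (column : Int) : List Int :=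
  let insertion_cost := PySem.List.pyGetD current_row (column - 1) 0 + 1
  let deletion_cost := PySem.List.pyGetD previous_row column 0 + 1
  let replacement_cost :=
    match PySem.Str.pyGet? word (column - 1) with
    | some wc =>
        if letter.toList = [wc] ∨ letter = "N" then PySem.List.pyGetD previous_row (column - 1) 0
        else PySem.List.pyGetD previous_row (column - 1) 0 + 1
    | none => PySem.List.pyGetD previous_row (column - 1) 0 + 1
  current_row ++ [min (min insertion_cost deletion_cost) replacement_cost]

def get_levenshtein_row (letter : String) (word : String) (previous_row : List Int) : List Int :=
  let columns : Int := PySem.Str.len word + 1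
  let current_row : List Int := [PySem.List.pyGetD previous_row 0 0 + 1]
  (PySem.List.pyRange 1 columns 1).foldl (levStepA letter word previous_row) current_row

-- ===== PORT B =====
-- body of Source B's `shifted` comprehension at index k (the `none` branch of the word
-- index is unreachable under Pre_)
def levCandidate (letter : String) (word : String) (previous_row : List Int) (k : Int) : Int :=
  min (PySem.List.pyGetD previous_row k 0 + 1)
      (PySem.List.pyGetD previous_row (k - 1) 0 +
        (match PySem.Str.pyGet? word (k - 1) with
         | some wc => if ¬(letter.toList = [wc] ∨ letter = "N") then 1 else 0
         | none => 1)) - k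

-- body of Source B's prefix-minimum loop ((pmins, m), s ↦ (pmins', m'))
def levStepPM (st : List Int × Int) (s : Int) : List Int × Int :=
  let m := min st.2 s
  (st.1 ++ [m], m)

def get_levenshtein_row_alt (letter : String) (word : String) (previous_row : List Int) : List Int :=
  let base := PySem.List.pyGetD previous_row 0 0 + 1
  let shifted := (PySem.List.pyRange 1 (PySem.Str.len word + 1) 1).map
    (levCandidate letter word previous_row)
  let pmins := (shifted.foldl levStepPM ([], base)).1
  [base] ++ (PySem.List.enumerate pmins 1).map (fun jm => jm.2 + jm.1)

-- ===== PRECONDITION & SPEC =====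
-- Pre_: exactly the inputs where A returns (previous_row long enough for every index the loop
-- reads; otherwise Python raises IndexError)
def Pre_get_levenshtein_row (letter : String) (word : String) (previous_row : List Int) : Prop :=
  word.toList.length < previous_row.length
instance (letter : String) (word : String) (previous_row : List Int) : Decidable (Pre_get_levenshtein_row letter word previous_row) := by unfold Pre_get_levenshtein_row; infer_instance

def pvWitness_get_levenshtein_row : String × String × List Int := ("a", "aN", [0, 1, 2])

def Spec_get_levenshtein_row (letter : String) (word : String) (previous_row : List Int) (out : List Int) : Prop := out = get_levenshtein_row_alt letter word previous_row
instance (letter : String) (word : String) (previous_row : List Int) (out : List Int) : Decidable (Spec_get_levenshtein_row letter word previous_row out) := by unfold Spec_get_levenshtein_row; infer_instance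

-- ===== CLAIM (what is proved, stated in full; the proofs are below) =====
def Claim_equal_get_levenshtein_row : Prop := ∀ (letter : String) (word : String) (previous_row : List Int), Dom_get_levenshtein_row letter word previous_row → Pre_get_levenshtein_row letter word previous_row → Spec_get_levenshtein_row letter word previous_row (get_levenshtein_row letter word previous_row)

-- ===== LEMMAS AND PROOFS =====

-- substitution cost of one column
def levCost (letter : String) (ch : Char) : Int :=
  if letter.toList = [ch] ∨ letter = "N" then 0 else 1

-- deletion/substitution candidate of one column triple
def levT (letter : String) (t : (Int × Int) × Char) : Int :=
  min (t.1.2 + 1) (t.1.1 + levCost letter t.2)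

-- one step of A's recurrence, as min of insertion against the candidate
def levGo (letter : String) (acc : Int) (t : (Int × Int) × Char) : Int :=
  min (min (acc + 1) (t.1.2 + 1)) (t.1.1 + levCost letter t.2)

-- reference scan for A: the cells appended for the given column triples, starting from acc
def levScan (letter : String) (acc : Int) : List ((Int × Int) × Char) → List Int
  | [] => []
  | t :: rest => levGo letter acc t :: levScan letter (levGo letter acc t) rest

-- final accumulator of A's scan
def levAcc (letter : String) (acc : Int) : List ((Int × Int) × Char) → Int
  | [] => acc
  | t :: rest => levAcc letter (levGo letter acc t) rest

-- reference prefix-min scan for B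
def pmScan (m : Int) : List Int → List Int
  | [] => []
  | s :: rest => min m s :: pmScan (min m s) rest

lemma levScan_snoc (letter : String) (acc : Int) (ts : List ((Int × Int) × Char)) (t : (Int × Int) × Char) :
    levScan letter acc (ts ++ [t]) = levScan letter acc ts ++ [levGo letter (levAcc letter acc ts) t] := by
  induction ts generalizing acc with
  | nil => simp [levScan, levAcc]
  | cons u us ih => simp [levScan, levAcc, ih]

lemma getD_cons_levScan (letter : String) (c0 : Int) (ts : List ((Int × Int) × Char)) :
    (c0 :: levScan letter c0 ts).getD ts.length 0 = levAcc letter c0 ts := by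
  induction ts generalizing c0 with
  | nil => simp [levScan, levAcc]
  | cons t rest ih => simpa [levScan, levAcc] using ih (levGo letter c0 t)

lemma foldA_eq (letter : String) (word : String) (previous_row : List Int)
    (hpre : word.toList.length < previous_row.length) (n : Nat) (hn : n ≤ word.toList.length) :
    (PySem.List.pyRange 1 ((n : Int) + 1) 1).foldl (levStepA letter word previous_row)
        [previous_row.getD 0 0 + 1]
      = (previous_row.getD 0 0 + 1) ::
        levScan letter (previous_row.getD 0 0 + 1)
          ((List.zip (List.zip previous_row previous_row.tail) word.toList).take n) := by
  induction n with
  | zero => simp [PySem.List.pyRange_one_eq_nil, levScan]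
  | succ m ih =>
      have hm : m ≤ word.toList.length := Nat.le_of_succ_le hn
      have hrange : PySem.List.pyRange 1 ((m : Int) + 1 + 1) 1
          = PySem.List.pyRange 1 ((m : Int) + 1) 1 ++ [(m : Int) + 1] :=
        PySem.List.pyRange_one_succ_right (by omega)
      have hcast : (((m + 1 : Nat)) : Int) + 1 = ((m : Int) + 1 + 1) := by push_cast; ring
      set ts := List.zip (List.zip previous_row previous_row.tail) word.toList with hts
      have hlen : m < ts.length := by
        rw [hts]
        have hW : word.toList.length = word.length := String.length_toList
        simp only [List.length_zip, List.length_tail]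
        omega
      have htake : ts.take (m + 1) = ts.take m ++ [ts[m]] := by
        rw [List.take_add_one]
        simp [List.getElem?_eq_getElem hlen]
      rw [hcast, hrange, List.foldl_append, ih hm, List.foldl_cons, List.foldl_nil, htake,
        levScan_snoc]
      have hmp : m < previous_row.length := by omega
      have hmp1 : m + 1 < previous_row.length := by omega
      have h1 : ts[m].1.1 = previous_row.getD m 0 := by
        simp [hts, List.getElem_zip, List.getD, List.getElem?_eq_getElem hmp]
      have h2 : ts[m].1.2 = previous_row.getD (m + 1) 0 := by
        simp [hts, List.getElem_zip, List.getElem_tail, List.getD,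
          List.getElem?_eq_getElem hmp1]
      have h3 : ts[m].2 = word.toList[m]'(by omega) := by
        simp [hts, List.getElem_zip]
      simp only [levStepA]
      have hcol1 : ((m : Int) + 1) - 1 = ((m : Nat) : Int) := by ring
      have hcol2 : ((m : Int) + 1) = (((m + 1 : Nat)) : Int) := by push_cast; ring
      rw [hcol1, hcol2]
      have hword : PySem.Str.pyGet? word ((m : Nat) : Int) = some (word.toList[m]'(by omega)) := by
        rw [PySem.Str.pyGet?_natCast]
        simp [List.getElem?_eq_getElem (show m < word.toList.length by omega)]
      rw [hword]
      have hlt : (ts.take m).length = m := by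
        simp only [List.length_take]
        omega
      have hcur : PySem.List.pyGetD
          ((previous_row.getD 0 0 + 1) :: levScan letter (previous_row.getD 0 0 + 1) (ts.take m))
          ((m : Nat) : Int) 0
          = levAcc letter (previous_row.getD 0 0 + 1) (ts.take m) := by
        have h := getD_cons_levScan letter (previous_row.getD 0 0 + 1) (ts.take m)
        rw [hlt] at h
        rw [PySem.List.pyGetD_natCast]
        exact h
      rw [hcur, List.cons_append]
      simp only [PySem.List.pyGetD_natCast, levGo, levCost, h1, h2, h3]
      congr 3
      split_ifs <;> omega

-- B's comprehension over pyRange equals the index-shifted candidates of the column triples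
lemma mapRange_eq (letter : String) (word : String) (previous_row : List Int)
    (hpre : word.toList.length < previous_row.length) (n : Nat) (hn : n ≤ word.toList.length) :
    (PySem.List.pyRange 1 ((n : Int) + 1) 1).map (levCandidate letter word previous_row)
      = ((List.zip (List.zip previous_row previous_row.tail) word.toList).take n).mapIdx
          (fun k t => levT letter t - ((k : Int) + 1)) := by
  induction n with
  | zero => simp [PySem.List.pyRange_one_eq_nil]
  | succ m ih =>
      have hm : m ≤ word.toList.length := Nat.le_of_succ_le hn
      have hrange : PySem.List.pyRange 1 ((m : Int) + 1 + 1) 1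
          = PySem.List.pyRange 1 ((m : Int) + 1) 1 ++ [(m : Int) + 1] :=
        PySem.List.pyRange_one_succ_right (by omega)
      have hcast : (((m + 1 : Nat)) : Int) + 1 = ((m : Int) + 1 + 1) := by push_cast; ring
      set ts := List.zip (List.zip previous_row previous_row.tail) word.toList with hts
      have hlen : m < ts.length := by
        rw [hts]
        have hW : word.toList.length = word.length := String.length_toList
        simp only [List.length_zip, List.length_tail]
        omega
      have htake : ts.take (m + 1) = ts.take m ++ [ts[m]] := by
        rw [List.take_add_one]
        simp [List.getElem?_eq_getElem hlen]
      have hlt : (ts.take m).length = m := by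
        simp only [List.length_take]; omega
      rw [hcast, hrange, List.map_append, ih hm, htake, List.mapIdx_append, hlt]
      congr 1
      have hmp : m < previous_row.length := by omega
      have hmp1 : m + 1 < previous_row.length := by omega
      have h1 : ts[m].1.1 = previous_row.getD m 0 := by
        simp [hts, List.getElem_zip, List.getD, List.getElem?_eq_getElem hmp]
      have h2 : ts[m].1.2 = previous_row.getD (m + 1) 0 := by
        simp [hts, List.getElem_zip, List.getElem_tail, List.getD,
          List.getElem?_eq_getElem hmp1]
      have h3 : ts[m].2 = word.toList[m]'(by omega) := by
        simp [hts, List.getElem_zip]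
      simp only [List.map_cons, List.map_nil, List.mapIdx_cons, List.mapIdx_nil]
      congr 1
      simp only [levCandidate, levT, levCost]
      have hcol1 : ((m : Int) + 1) - 1 = ((m : Nat) : Int) := by ring
      have hcol2 : ((m : Int) + 1) = (((m + 1 : Nat)) : Int) := by push_cast; ring
      rw [hcol1, hcol2]
      have hword : PySem.Str.pyGet? word ((m : Nat) : Int) = some (word.toList[m]'(by omega)) := by
        rw [PySem.Str.pyGet?_natCast]
        simp [List.getElem?_eq_getElem (show m < word.toList.length by omega)]
      rw [hword]
      simp only [PySem.List.pyGetD_natCast, h1, h2, h3]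
      have : (((m + 1 : Nat)) : Int) = (m : Int) + 1 := by push_cast; ring
      rw [this]
      split_ifs <;> omega

-- Source B's prefix-minimum loop computes the reference scan and ends at the fold of min
lemma foldPM_eq (sl : List Int) (pre : List Int) (m : Int) :
    sl.foldl levStepPM (pre, m) = (pre ++ pmScan m sl, sl.foldl min m) := by
  induction sl generalizing pre m with
  | nil => simp [pmScan]
  | cons s rest ih => simp [levStepPM, pmScan, ih]

lemma pmScan_snoc (m : Int) (sl : List Int) (s : Int) :
    pmScan m (sl ++ [s]) = pmScan m sl ++ [min (sl.foldl min m) s] := by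
  induction sl generalizing m with
  | nil => simp [pmScan]
  | cons u us ih => simp [pmScan, ih]

lemma pmScan_length (m : Int) (sl : List Int) : (pmScan m sl).length = sl.length := by
  induction sl generalizing m with
  | nil => rfl
  | cons u us ih => simp [pmScan, ih]

-- final accumulator of A's scan = fold of min over the shifted candidates, plus the length
lemma levAcc_snoc (letter : String) (base : Int) (us : List ((Int × Int) × Char)) (u : (Int × Int) × Char) :
    levAcc letter base (us ++ [u]) = levGo letter (levAcc letter base us) u := by
  induction us generalizing base with
  | nil => simp [levAcc]
  | cons v vs ihv => simp [levAcc, ihv]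

lemma levAcc_eq (letter : String) (base : Int) (ts : List ((Int × Int) × Char)) :
    levAcc letter base ts
      = (ts.mapIdx (fun k t => levT letter t - ((k : Int) + 1))).foldl min base + ts.length := by
  induction ts using List.reverseRecOn with
  | nil => simp [levAcc]
  | append_singleton us u ih =>
      rw [levAcc_snoc, List.mapIdx_append]
      simp only [List.mapIdx_cons, List.mapIdx_nil, List.foldl_append, List.foldl_cons,
        List.foldl_nil, List.length_append, List.length_singleton]
      rw [ih]
      simp only [levGo, levT]
      push_cast
      omega

-- the closed form: A's scan is the index-shifted prefix minima re-indexed back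
lemma levScan_closed (letter : String) (base : Int) (ts : List ((Int × Int) × Char)) :
    levScan letter base ts
      = (pmScan base (ts.mapIdx (fun k t => levT letter t - ((k : Int) + 1)))).mapIdx
          (fun j m => m + ((j : Int) + 1)) := by
  induction ts using List.reverseRecOn with
  | nil => simp [levScan, pmScan]
  | append_singleton us u ih =>
      rw [levScan_snoc, List.mapIdx_append]
      simp only [List.mapIdx_cons, List.mapIdx_nil]
      rw [pmScan_snoc, List.mapIdx_append, ih]
      have hlen : (pmScan base (us.mapIdx (fun k t => levT letter t - ((k : Int) + 1)))).length
          = us.length := by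
        rw [pmScan_length]; simp
      rw [hlen]
      congr 1
      simp only [List.mapIdx_cons, List.mapIdx_nil]
      rw [levAcc_eq]
      simp only [levGo, levT]
      simp only [Nat.zero_add, List.cons.injEq, and_true]
      omega

-- enumerate-with-start map = mapIdx re-indexing
lemma enumMap_eq (l : List Int) :
    (PySem.List.enumerate l 1).map (fun jm => jm.2 + jm.1)
      = l.mapIdx (fun j m => m + ((j : Int) + 1)) := by
  apply List.ext_getElem
  · simp [PySem.List.length_enumerate]
  · intro j h1 h2
    simp only [List.getElem_map, PySem.List.getElem_enumerate, List.getElem_mapIdx]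
    ring

-- ===== VERDICT (by name: the statement is the Claim_ definition above) =====
theorem get_levenshtein_row_spec : Claim_equal_get_levenshtein_row := by
  intro letter word previous_row _ hpre
  unfold Spec_get_levenshtein_row get_levenshtein_row get_levenshtein_row_alt
  have hpre' : word.toList.length < previous_row.length := hpre
  set ts := List.zip (List.zip previous_row previous_row.tail) word.toList with hts
  have hlen : ts.length = word.toList.length := by
    rw [hts]
    simp only [List.length_zip, List.length_tail]
    omega
  have htake : ts.take word.toList.length = ts := by
    rw [← hlen]; exact List.take_length
  simp only [PySem.Str.len_eq, PySem.List.pyGetD_zero]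
  rw [show ((word.toList.length : Int) + 1) = ((word.toList.length : Nat) : Int) + 1 from rfl,
    foldA_eq letter word previous_row hpre' word.toList.length le_rfl,
    mapRange_eq letter word previous_row hpre' word.toList.length le_rfl]
  rw [← hts, htake, foldPM_eq, enumMap_eq, levScan_closed]
  rfl
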